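-- pv_equiv track=rewrite | github.com/waderice52224/mips | starter.py | create_label_table
-- ===== SOURCE A (Python) =====
-- def create_label_table(lines):
--     i = 0
--     value = 0
--     label_table = {}
--     for j in range(len(lines)):
--         index = lines[i].find(":") + 1
--         if lines[i].find(":") != -1:
--             key = lines[i][:index].replace(":", "")
--             label_table[key] = value
--             lines.remove(lines[i])
--         else:
--             value += 1
--             i += 1
--     return label_table
-- ===== SOURCE B (Python) =====
-- def create_label_table(lines):
--     # Single pass: record each label (text before its first ':') at the current
--     # instruction counter, collect non-label lines, and assign them back so the
--     # caller sees the same stripped list A leaves behind.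
--     label_table = {}
--     value = 0
--     kept = []
--     for line in lines:
--         c = line.find(":")
--         if c != -1:
--             label_table[line[:c]] = value
--         else:
--             value += 1
--             kept.append(line)
--     lines[:] = kept
--     return label_table
-- ===== Notes on version B (the rewrite author's own statement) =====
-- stated objective: simpler
-- what changed: A repeatedly indexes and removes label lines from the list in place and builds each key by slicing past the colon then deleting it with replace; B makes one plain pass with an instruction counter, keys each label by the text before its first colon, and assigns the kept lines back in one step.
import Mathlib
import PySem

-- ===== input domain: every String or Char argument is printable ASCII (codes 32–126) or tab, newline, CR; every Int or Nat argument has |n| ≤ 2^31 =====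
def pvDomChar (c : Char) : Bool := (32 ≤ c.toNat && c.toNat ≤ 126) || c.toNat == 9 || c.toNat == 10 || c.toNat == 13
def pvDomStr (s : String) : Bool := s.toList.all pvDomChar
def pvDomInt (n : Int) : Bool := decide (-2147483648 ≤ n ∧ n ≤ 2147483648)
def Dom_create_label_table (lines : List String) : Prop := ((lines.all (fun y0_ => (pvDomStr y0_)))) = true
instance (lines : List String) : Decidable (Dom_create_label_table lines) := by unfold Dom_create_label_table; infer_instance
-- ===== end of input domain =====

-- B replaces A's index-juggling loop with in-place removal by one plain pass with a counter;
-- both Pythons mutate `lines` identically (label lines stripped); the theorems below are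
-- about the returned table only.

-- ===== PORT A =====
-- the for-j loop: state = (current lines, i, value, table); n counts the remaining iterations
def aLoop (n : Nat) (lines : List String) (i value : Int)
    (table : PySem.Dict String Int) : PySem.Dict String Int :=
  match n with
  | 0 => table
  | n + 1 =>
    match PySem.List.pyGet? lines i with
    | none => table      -- lines[i] IndexError: never reached by A's loop (guard for totality)
    | some s =>
      let index := PySem.Str.find s ":" + 1
      if PySem.Str.find s ":" ≠ -1 then
        let key := PySem.Str.replace (PySem.Str.slice s none (some index)) ":" ""
        let table' := table.insert key value
        match PySem.List.remove? lines s with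
        | none => table'  -- lines.remove ValueError: never reached (s ∈ lines) (guard for totality)
        | some lines' => aLoop n lines' i value table'
      else
        aLoop n lines (i + 1) (value + 1) table

def create_label_table (lines : List String) : List (String × Int) :=
  (aLoop lines.length lines 0 0 PySem.Dict.empty).items

-- ===== PORT B =====
-- B's single pass: state = (table, value, kept)
def bStep (st : PySem.Dict String Int × Int × List String) (line : String) :
    PySem.Dict String Int × Int × List String :=
  let c := PySem.Str.find line ":"
  if c ≠ -1 then
    (st.1.insert (PySem.Str.slice line none (some c)) st.2.1, st.2.1, st.2.2)
  else
    (st.1, st.2.1 + 1, st.2.2 ++ [line])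

def create_label_table_alt (lines : List String) : List (String × Int) :=
  ((lines.foldl bStep (PySem.Dict.empty, 0, [])).1).items

-- ===== PRECONDITION & SPEC =====
def Spec_create_label_table (lines : List String) (out : List (String × Int)) : Prop := out = create_label_table_alt lines
instance (lines : List String) (out : List (String × Int)) : Decidable (Spec_create_label_table lines out) := by unfold Spec_create_label_table; infer_instance

-- ===== CLAIM (what is proved, stated in full; the proofs are below) =====
def Claim_equal_create_label_table : Prop := ∀ (lines : List String), Dom_create_label_table lines → Spec_create_label_table lines (create_label_table lines)

-- ===== LEMMAS AND PROOFS =====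

-- replace.go with old = ":" and new = "" just drops the trailing ':' of l ++ [':'] when l has no ':'
lemma go_colon (l : List Char) (acc : List Char) (fuel : Nat) (hf : l.length + 1 ≤ fuel)
    (hnc : ':' ∉ l) :
    PySem.Chars.replace.go [':'] [] fuel (l ++ [':']) acc = acc.reverse ++ l := by
  induction l generalizing acc fuel with
  | nil =>
    obtain ⟨f, rfl⟩ : ∃ f, fuel = f + 1 := ⟨fuel - 1, by omega⟩
    rw [PySem.Chars.replace.go.eq_def]
    simp [List.isPrefixOf]
    cases f <;> rw [PySem.Chars.replace.go.eq_def] <;> simp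
  | cons c t ih =>
    obtain ⟨f, rfl⟩ : ∃ f, fuel = f + 1 := ⟨fuel - 1, by omega⟩
    rw [PySem.Chars.replace.go.eq_def]
    have hc : c ≠ ':' := by intro h; exact hnc (by simp [h])
    simp only [List.cons_append, List.isPrefixOf, Bool.and_eq_true, beq_iff_eq]
    rw [if_neg (by simp [Ne.symm hc])]
    rw [ih (c :: acc) f (by simp at hf ⊢; omega) (fun h => hnc (by simp [h]))]
    simp

-- A's key  s[:find+1].replace(":", "")  equals B's key  s[:find]  whenever find ≠ -1
lemma keyAB_chars (cl : List Char) (h : PySem.Chars.find cl [':'] ≠ -1) :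
    PySem.Chars.replace (PySem.List.slice cl none (some (PySem.Chars.find cl [':'] + 1))) [':'] [] =
      PySem.List.slice cl none (some (PySem.Chars.find cl [':'])) := by
  have h0 : 0 ≤ PySem.Chars.find cl [':'] := by
    have := PySem.Chars.neg_one_le_find cl [':']
    omega
  set c : Nat := (PySem.Chars.find cl [':']).toNat with hc
  have hfc : PySem.Chars.find cl [':'] = (c : Int) := by omega
  obtain ⟨hpfx, hmin⟩ := PySem.Chars.find_spec h0
  rw [hfc]
  have hplus : (c : Int) + 1 = ((c + 1 : Nat) : Int) := by push_cast; ring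
  rw [hplus, PySem.List.slice_to_natCast, PySem.List.slice_to_natCast]
  obtain ⟨t, ht⟩ := hpfx
  have hlt : c < cl.length := by
    by_contra hge
    rw [List.drop_eq_nil_of_le (by omega)] at ht
    simp at ht
  have hgetc : cl[c]'hlt = ':' := by
    rw [List.drop_eq_getElem_cons hlt] at ht
    exact (List.cons.injEq _ _ _ _ ▸ ht).1.symm
  have htake : cl.take (c + 1) = cl.take c ++ [':'] := by
    rw [List.take_add_one]
    simp [List.getElem?_eq_getElem hlt, hgetc]
  have hnc : ':' ∉ cl.take c := by
    intro hmem
    obtain ⟨i, hi, hget⟩ := List.mem_iff_getElem.mp hmem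
    have hic : i < c := by simpa using (List.length_take_le c cl).trans_lt' hi
    have hicl : i < cl.length := by omega
    apply hmin i hic
    refine ⟨cl.drop (i + 1), ?_⟩
    rw [List.drop_eq_getElem_cons hicl]
    have : cl[i]'hicl = ':' := by
      simp [List.getElem_take] at hget
      exact hget
    simp [this]
  rw [htake, PySem.Chars.replace]
  rw [if_neg (by simp)]
  have hlen : (cl.take c ++ [':']).length = (cl.take c).length + 1 := by simp
  rw [hlen, go_colon _ _ _ (le_refl _) hnc]
  simp

-- A's key  s[:find+1].replace(":", "")  equals B's key  s[:find]  whenever find ≠ -1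
lemma keyAB (s : String) (h : PySem.Str.find s ":" ≠ -1) :
    PySem.Str.replace (PySem.Str.slice s none (some (PySem.Str.find s ":" + 1))) ":" "" =
      PySem.Str.slice s none (some (PySem.Str.find s ":")) := by
  have hch : PySem.Chars.find s.toList [':'] ≠ -1 := by
    simpa [PySem.Str.find_eq] using h
  have := keyAB_chars s.toList hch
  apply String.toList_inj.mp
  simpa [PySem.Str.find_eq, PySem.Str.toList_replace, PySem.Str.toList_slice] using this

-- removing a value absent from the prefix removes the head of the suffix
lemma remove_mid (pre rest : List String) (x : String) (hx : x ∉ pre) :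
    PySem.List.remove? (pre ++ x :: rest) x = some (pre ++ rest) := by
  induction pre with
  | nil => simp
  | cons p t ih =>
    have hp : p ≠ x := by intro h; exact hx (by simp [h])
    rw [List.cons_append, PySem.List.remove?_cons_of_ne _ hp, ih (by simp at hx; tauto)]
    rfl

-- the loop invariant: pre = already-kept colon-free lines, i = |pre|
lemma loop_inv (rest : List String) : ∀ (pre kept : List String) (value : Int)
    (table : PySem.Dict String Int), (∀ p ∈ pre, PySem.Str.find p ":" = -1) →
    aLoop rest.length (pre ++ rest) (pre.length : Int) value table =
      (rest.foldl bStep (table, value, kept)).1 := by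
  induction rest with
  | nil => intro pre kept value table _; simp [aLoop]
  | cons x rest ih =>
    intro pre kept value table hpre
    have hget : PySem.List.pyGet? (pre ++ x :: rest) ((pre.length : Nat) : Int) = some x := by
      rw [PySem.List.pyGet?_natCast]
      simp
    rw [List.length_cons, aLoop, hget]
    dsimp only
    by_cases hx : PySem.Str.find x ":" = -1
    · rw [if_neg (by simpa using hx)]
      have h1 : pre ++ x :: rest = (pre ++ [x]) ++ rest := by simp
      have h2 : (pre.length : Int) + 1 = (((pre ++ [x]).length : Nat) : Int) := by
        simp
      rw [h1, h2, ih (pre ++ [x]) (kept ++ [x]) (value + 1) table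
        (by intro p hp; rcases List.mem_append.mp hp with h | h
            · exact hpre p h
            · simp at h; subst h; exact hx)]
      simp only [List.foldl_cons, bStep]
      rw [if_neg (by simpa using hx)]
    · rw [if_pos (by simpa using hx)]
      have hxpre : x ∉ pre := by
        intro hmem; exact hx (hpre x hmem)
      rw [remove_mid pre rest x hxpre]
      dsimp only
      rw [keyAB x (by simpa using hx)]
      rw [ih pre kept value (table.insert (PySem.Str.slice x none (some (PySem.Str.find x ":"))) value) hpre]
      simp only [List.foldl_cons, bStep]
      rw [if_pos (by simpa using hx)]

-- ===== VERDICT (by name: the statement is the Claim_ definition above) =====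
theorem create_label_table_spec : Claim_equal_create_label_table := by
  intro lines _
  unfold Spec_create_label_table create_label_table create_label_table_alt
  have := loop_inv lines [] [] 0 PySem.Dict.empty (by simp)
  simpa using congrArg PySem.Dict.items this
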